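-- pv_equiv track=rewrite | github.com/MarkusMathiasen/xprog | nwerc/2021/competition/A/testing_tool.py | delay
-- ===== SOURCE A (Python) =====
-- def op_if()->int:
--     return 1
--
-- def op_for()->int:
--     return 1
--
-- def op_assign()->int:
--     return 1
--
-- def op_comp()->int:
--     return 3
--
-- def op_return()->int:
--     return 1
--
-- def op_init()->int:
--     return 1
--
-- def delay(user_pw: str, correct_pw: str)-> int:
--     assert len(user_pw)>0 and len(user_pw)<21, 'Entered Password has wrong length (0<pw<21)'
--     assert len(correct_pw)>0 and len(correct_pw)<21, 'Correct Password has wrong length (0<pw<21)'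
--
--     time = op_if()+op_comp()
--
--     if len(user_pw) != len(correct_pw): #Pw length check
--         return time+op_return()
--
--     time +=op_init() + op_for() + op_comp() + op_comp() + op_if()
--     for i in range(0, common_length(user_pw, correct_pw)):
--         time += op_assign() + op_comp() + op_for() + op_comp() + op_if()
--     return time + op_return()
--
-- def common_length(user_pw: str, correct_pw: str)-> int:
--     common = 0
--     for i, j in zip(user_pw, correct_pw):
--         if i == j:
--             common +=1
--         else:
--             return common
--     return common
-- ===== SOURCE B (Python) =====
-- def delay(user_pw: str, correct_pw: str) -> int:
--     assert len(user_pw) > 0 and len(user_pw) < 21, 'Entered Password has wrong length (0<pw<21)'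
--     assert len(correct_pw) > 0 and len(correct_pw) < 21, 'Correct Password has wrong length (0<pw<21)'
--     n = len(user_pw)
--     if n != len(correct_pw):
--         return 5
--     # binary search for the longest k with user_pw[:k] == correct_pw[:k]
--     # (prefix equality is downward closed, so the search is correct)
--     lo, hi = 0, n
--     while lo < hi:
--         mid = (lo + hi + 1) // 2
--         if user_pw[:mid] == correct_pw[:mid]:
--             lo = mid
--         else:
--             hi = mid - 1
--     return 14 + 9 * lo
-- ===== Notes on version B (the rewrite author's own statement) =====
-- stated objective: alternative
-- what changed: B drops A's per-character cost-accumulation loop and its zip-scan helper entirely: it binary-searches (on slice equality, which is downward closed) for the longest equal prefix and returns the closed form 14 + 9*k (5 on length mismatch).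
import Mathlib
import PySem

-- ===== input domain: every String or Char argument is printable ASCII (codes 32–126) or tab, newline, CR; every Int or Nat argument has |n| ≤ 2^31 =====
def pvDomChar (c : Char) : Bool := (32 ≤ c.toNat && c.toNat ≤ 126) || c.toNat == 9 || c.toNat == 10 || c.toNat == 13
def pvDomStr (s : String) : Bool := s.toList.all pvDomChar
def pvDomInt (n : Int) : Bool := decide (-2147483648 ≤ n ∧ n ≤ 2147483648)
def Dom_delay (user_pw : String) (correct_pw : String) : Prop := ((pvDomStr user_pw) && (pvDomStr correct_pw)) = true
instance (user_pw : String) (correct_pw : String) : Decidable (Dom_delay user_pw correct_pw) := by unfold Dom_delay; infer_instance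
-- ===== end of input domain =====

-- B replaces A's per-character cost-accumulation loop and its zip-scan helper by a
-- binary search on slice equality for the longest equal prefix plus the closed form
-- 14 + 9*k (alternative algorithm; not claimed faster).


-- ===== PORT A =====
def op_if : Int := 1
def op_for : Int := 1
def op_assign : Int := 1
def op_comp : Int := 3
def op_return : Int := 1
def op_init : Int := 1

-- common_length: loop over zip with an accumulator, early return on first mismatch
def commonLength (pairs : List (Char × Char)) (common : Int) : Int :=
  match pairs with
  | [] => common
  | (i, j) :: rest => if i = j then commonLength rest (common + 1) else common

def delay (user_pw : String) (correct_pw : String) : Int :=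
  let time := op_if + op_comp
  if PySem.Str.len user_pw ≠ PySem.Str.len correct_pw then
    time + op_return
  else
    let time := time + op_init + op_for + op_comp + op_comp + op_if
    let time := (PySem.List.pyRange 0 (commonLength (user_pw.toList.zip correct_pw.toList) 0) 1).foldl
      (fun t _ => t + (op_assign + op_comp + op_for + op_comp + op_if)) time
    time + op_return

-- ===== PORT B =====
-- Source B's binary-search loop; lo, hi, mid stay in [0, n] so they are Nats, and the
-- Python slice s[:mid] for 0 ≤ mid is List.take mid.
def lcpSearch (u c : List Char) (lo hi : Nat) : Nat :=
  if lo < hi then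
    let mid := (lo + hi + 1) / 2
    if u.take mid = c.take mid then lcpSearch u c mid hi
    else lcpSearch u c lo (mid - 1)
  else lo
termination_by hi - lo
decreasing_by all_goals omega

def delay_alt (user_pw : String) (correct_pw : String) : Int :=
  if PySem.Str.len user_pw ≠ PySem.Str.len correct_pw then 5
  else 14 + 9 * (lcpSearch user_pw.toList correct_pw.toList 0 user_pw.toList.length : Int)

-- ===== PRECONDITION & SPEC =====
-- Pre_ excludes exactly the inputs on which A's asserts raise AssertionError: a password of length 0 or ≥ 21.
def Pre_delay (user_pw : String) (correct_pw : String) : Prop :=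
  0 < user_pw.toList.length ∧ user_pw.toList.length < 21 ∧
  0 < correct_pw.toList.length ∧ correct_pw.toList.length < 21
instance (user_pw : String) (correct_pw : String) : Decidable (Pre_delay user_pw correct_pw) := by unfold Pre_delay; infer_instance
def pvWitness_delay : String × String := ("abc", "abd")

def Spec_delay (user_pw : String) (correct_pw : String) (out : Int) : Prop := out = delay_alt user_pw correct_pw
instance (user_pw : String) (correct_pw : String) (out : Int) : Decidable (Spec_delay user_pw correct_pw out) := by unfold Spec_delay; infer_instance

-- ===== CLAIM (what is proved, stated in full; the proofs are below) =====
def Claim_equal_delay : Prop := ∀ (user_pw : String) (correct_pw : String), Dom_delay user_pw correct_pw → Pre_delay user_pw correct_pw → Spec_delay user_pw correct_pw (delay user_pw correct_pw)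

-- ===== LEMMAS AND PROOFS =====

-- the mathematical longest-common-prefix length, used only in the proofs
def lcpNat (a b : List Char) : Nat :=
  match a, b with
  | x :: xs, y :: ys => if x = y then 1 + lcpNat xs ys else 0
  | _, _ => 0

theorem lcpNat_le_length (a b : List Char) : lcpNat a b ≤ a.length := by
  induction a generalizing b with
  | nil => simp [lcpNat]
  | cons x xs ih =>
    cases b with
    | nil => simp [lcpNat]
    | cons y ys =>
      simp only [lcpNat, List.length_cons]
      split_ifs with h
      · have := ih ys; omega
      · omega

-- A's accumulator-style common_length equals the lcp
theorem commonLength_eq_lcpNat (a b : List Char) (k : Int) :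
    commonLength (a.zip b) k = k + (lcpNat a b : Int) := by
  induction a generalizing b k with
  | nil => simp [commonLength, lcpNat]
  | cons x xs ih =>
    cases b with
    | nil => simp [commonLength, lcpNat]
    | cons y ys =>
      simp only [List.zip_cons_cons, commonLength, lcpNat]
      split_ifs with h
      · rw [ih]; push_cast; ring
      · simp

-- prefix equality is characterised by the lcp (for k within the common length)
theorem take_eq_iff (a b : List Char) (h : a.length = b.length) (k : Nat) (hk : k ≤ a.length) :
    (a.take k = b.take k) ↔ k ≤ lcpNat a b := by
  induction a generalizing b k with
  | nil =>
    cases b with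
    | nil => simp [lcpNat] at hk ⊢; omega
    | cons y ys => simp at h
  | cons x xs ih =>
    cases b with
    | nil => simp at h
    | cons y ys =>
      cases k with
      | zero => simp
      | succ m =>
        simp only [List.take_succ_cons, List.cons.injEq, lcpNat]
        simp only [List.length_cons] at h hk
        split_ifs with hxy
        · rw [ih ys (by omega) m (by omega)]
          constructor
          · rintro ⟨_, h2⟩; omega
          · intro h2; exact ⟨hxy, by omega⟩
        · constructor
          · rintro ⟨h1, _⟩; exact absurd h1 hxy
          · omega

-- the binary search computes the lcp when the invariant lo ≤ L ≤ hi ≤ n holds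
theorem lcpSearch_eq (a b : List Char) (h : a.length = b.length) :
    ∀ (lo hi : Nat), lo ≤ lcpNat a b → lcpNat a b ≤ hi → hi ≤ a.length →
    lcpSearch a b lo hi = lcpNat a b := by
  intro lo hi
  induction lo, hi using lcpSearch.induct a b with
  | case1 lo hi hlt mid htake ih =>
    intro h1 h2 h3
    rw [lcpSearch]
    simp only [hlt, if_true]
    rw [if_pos htake]
    have hmidn : mid ≤ a.length := by simp only [mid]; omega
    have := (take_eq_iff a b h mid hmidn).mp htake
    exact ih this h2 h3
  | case2 lo hi hlt mid htake ih =>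
    intro h1 h2 h3
    rw [lcpSearch]
    simp only [hlt, if_true]
    rw [if_neg htake]
    have hmidn : mid ≤ a.length := by simp only [mid]; omega
    have hgt : ¬ mid ≤ lcpNat a b := fun hle => htake ((take_eq_iff a b h mid hmidn).mpr hle)
    exact ih h1 (by omega) (by omega)
  | case3 lo hi hlt =>
    intro h1 h2 h3
    rw [lcpSearch]
    simp only [hlt, if_false]
    omega

-- the per-iteration op-constant loop adds 9 per iteration
theorem foldl_const9 (n : Nat) (t : Int) :
    (PySem.List.pyRange 0 (n : Int) 1).foldl (fun t _ => t + 9) t = t + 9 * n := by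
  rw [PySem.List.pyRange_zero_natCast, PySem.List.foldl_add (g := fun _ => 9)]
  simp [Function.comp_def, mul_comm]

-- ===== VERDICT (by name: the statement is the Claim_ definition above) =====
theorem delay_spec : Claim_equal_delay := by
  intro u c _ _
  unfold Spec_delay delay delay_alt
  simp only [op_if, op_comp, op_return, op_init, op_for, op_assign]
  split_ifs with h
  · rfl
  · push Not at h
    have hlen : u.toList.length = c.toList.length := by
      have := h
      simp [PySem.Str.len_eq] at this
      exact_mod_cast this
    rw [commonLength_eq_lcpNat]
    norm_num
    rw [foldl_const9]
    rw [← String.length_toList]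
    rw [lcpSearch_eq u.toList c.toList hlen 0 u.toList.length
      (Nat.zero_le _) (lcpNat_le_length _ _) le_rfl]
    ring
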